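-- pv_equiv track=rewrite | github.com/luizhenriquemaia/system_sgq | sgqcmm/main/funcoes.py | listacodigossup
-- ===== SOURCE A (Python) =====
-- def listacodigossup(codatual):
--     nivatual = codatual.count('.')
--     result = []
--     if nivatual > 1:
--         numeros = codatual.split('.')
--         for cont in range(nivatual-1):
--             if cont > 0:
--                 result.append(result[cont - 1] + numeros[cont] + '.')
--             else:
--                 result.append(numeros[cont] + '.')
--     return result
-- ===== SOURCE B (Python) =====
-- def listacodigossup(codatual):
--     dots = [i for i, c in enumerate(codatual) if c == '.']
--     if len(dots) <= 1:
--         return []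
--     return [codatual[:d + 1] for d in dots[:len(dots) - 1]]
-- ===== Notes on version B (the rewrite author's own statement) =====
-- stated objective: alternative
-- what changed: A splits the code on dots and rebuilds each prefix by appending the next segment to the previous entry of the result list it is constructing; B never splits or concatenates at all: it collects the positions of the dot characters and returns, for each dot but the last, the original string sliced up to and including that dot.
import Mathlib
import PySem

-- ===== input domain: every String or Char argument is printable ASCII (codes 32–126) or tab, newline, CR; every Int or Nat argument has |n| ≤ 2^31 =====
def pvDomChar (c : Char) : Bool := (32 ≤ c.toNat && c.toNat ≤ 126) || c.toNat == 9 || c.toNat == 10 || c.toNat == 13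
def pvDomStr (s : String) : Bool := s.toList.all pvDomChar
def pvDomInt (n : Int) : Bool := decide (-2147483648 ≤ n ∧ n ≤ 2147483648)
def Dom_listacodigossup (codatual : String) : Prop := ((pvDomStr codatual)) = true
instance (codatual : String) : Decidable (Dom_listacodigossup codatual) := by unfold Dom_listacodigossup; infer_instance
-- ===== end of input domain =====

-- B drops A's split/accumulator machinery entirely: it collects the '.' positions and slices the
-- original string once per prefix (each prefix IS codatual up to a dot, inclusive); objective: alternative.

-- ===== PORT A =====
def listacodigossup (codatual : String) : List String :=
  let nivatual : Nat := PySem.Str.count codatual "."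
  let result : List String := []
  if nivatual > 1 then
    let numeros : List String := (PySem.Str.split? codatual ".").getD []
    (PySem.List.pyRange 0 ((nivatual : Int) - 1) 1).foldl
      (fun result cont =>
        if cont > 0 then
          result ++ [((PySem.List.pyGet? result (cont - 1)).getD "") ++ ((PySem.List.pyGet? numeros cont).getD "") ++ "."]
        else
          result ++ [((PySem.List.pyGet? numeros cont).getD "") ++ "."])
      result
  else result

-- ===== PORT B =====
-- dots = [i for i, c in enumerate(codatual) if c == '.']
-- if len(dots) <= 1: return []
-- return [codatual[:d + 1] for d in dots[:len(dots) - 1]]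
def listacodigossup_alt (codatual : String) : List String :=
  let dots : List Int :=
    (PySem.List.enumerate codatual.toList 0).filterMap
      (fun p => if p.2 = '.' then some p.1 else none)
  if dots.length ≤ 1 then []
  else
    (PySem.List.slice dots none (some ((dots.length : Int) - 1))).map
      (fun d => PySem.Str.slice codatual none (some (d + 1)))

-- ===== PRECONDITION & SPEC =====
def Spec_listacodigossup (codatual : String) (out : List String) : Prop := out = listacodigossup_alt codatual
instance (codatual : String) (out : List String) : Decidable (Spec_listacodigossup codatual out) := by unfold Spec_listacodigossup; infer_instance

-- ===== CLAIM (what is proved, stated in full; the proofs are below) =====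
def Claim_equal_listacodigossup : Prop := ∀ (codatual : String), Dom_listacodigossup codatual → Spec_listacodigossup codatual (listacodigossup codatual)

-- ===== LEMMAS AND PROOFS =====

-- character-level '.'-count, structural form
def pvCnt : List Char → Nat
  | [] => 0
  | c :: t => (if c = '.' then 1 else 0) + pvCnt t

theorem pvCountGo_eq (fuel : Nat) : ∀ (l : List Char) (a : Nat), l.length ≤ fuel →
    PySem.Chars.count.go ['.'] fuel l a = a + pvCnt l := by
  induction fuel with
  | zero =>
    intro l a h
    have hl : l = [] := List.eq_nil_of_length_eq_zero (Nat.le_zero.mp h)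
    subst hl
    simp [PySem.Chars.count.go, pvCnt]
  | succ fuel ih =>
    intro l a h
    cases l with
    | nil => simp [PySem.Chars.count.go, pvCnt]
    | cons c rest =>
      have hr : rest.length ≤ fuel := by
        simpa using Nat.le_of_succ_le_succ (by simpa using h)
      by_cases hc : c = '.'
      · subst hc
        simp [PySem.Chars.count.go, List.isPrefixOf, ih rest (a + 1) hr, pvCnt]
        omega
      · simp [PySem.Chars.count.go, List.isPrefixOf, hc, Ne.symm hc, ih rest a hr, pvCnt]

theorem pvCount_eq (s : String) : PySem.Str.count s "." = pvCnt s.toList := by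
  rw [PySem.Str.count_eq, show (String.toList ".") = ['.'] from by decide]
  unfold PySem.Chars.count
  simpa using pvCountGo_eq s.toList.length s.toList 0 le_rfl

-- structural form of s.split('.')
def pvSplit : List Char → List (List Char)
  | [] => [[]]
  | c :: t => if c = '.' then [] :: pvSplit t
              else match pvSplit t with
                   | [] => [[c]]
                   | h :: r => (c :: h) :: r

def pvConsHead (x : List Char) : List (List Char) → List (List Char)
  | [] => [x]
  | h :: r => (x ++ h) :: r

theorem pvSplit_ne_nil (l : List Char) : pvSplit l ≠ [] := by
  cases l with
  | nil => simp [pvSplit]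
  | cons c t =>
    simp only [pvSplit]
    split_ifs
    · simp
    · cases h : pvSplit t <;> simp

theorem pvSplit_length (l : List Char) : (pvSplit l).length = pvCnt l + 1 := by
  induction l with
  | nil => simp [pvSplit, pvCnt]
  | cons c t ih =>
    simp only [pvSplit, pvCnt]
    split_ifs with hc
    · simp [ih]; omega
    · cases h : pvSplit t with
      | nil => exact absurd h (pvSplit_ne_nil t)
      | cons p r => rw [h] at ih; simp at ih ⊢; omega

theorem pvSplitGo_eq (fuel : Nat) : ∀ (l cur : List Char) (acc : List (List Char)),
    l.length ≤ fuel →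
    PySem.Chars.splitOn.go ['.'] fuel l cur acc =
      acc.reverse ++ pvConsHead cur.reverse (pvSplit l) := by
  induction fuel with
  | zero =>
    intro l cur acc h
    have hl : l = [] := List.eq_nil_of_length_eq_zero (Nat.le_zero.mp h)
    subst hl
    simp [PySem.Chars.splitOn.go, pvSplit, pvConsHead]
  | succ fuel ih =>
    intro l cur acc h
    cases l with
    | nil => simp [PySem.Chars.splitOn.go, pvSplit, pvConsHead]
    | cons c rest =>
      have hr : rest.length ≤ fuel := by
        simpa using Nat.le_of_succ_le_succ (by simpa using h)
      by_cases hc : c = '.'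
      · subst hc
        rw [show PySem.Chars.splitOn.go ['.'] (fuel+1) ('.' :: rest) cur acc =
              PySem.Chars.splitOn.go ['.'] fuel rest [] (cur.reverse :: acc) from by
            simp [PySem.Chars.splitOn.go, List.isPrefixOf]]
        rw [ih rest [] (cur.reverse :: acc) hr]
        cases hs : pvSplit rest with
        | nil => exact absurd hs (pvSplit_ne_nil rest)
        | cons p r => simp [pvSplit, pvConsHead, hs]
      · rw [show PySem.Chars.splitOn.go ['.'] (fuel+1) (c :: rest) cur acc =
              PySem.Chars.splitOn.go ['.'] fuel rest (c :: cur) acc from by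
            simp [PySem.Chars.splitOn.go, List.isPrefixOf, Ne.symm hc]]
        rw [ih rest (c :: cur) acc hr]
        cases hs : pvSplit rest with
        | nil => exact absurd hs (pvSplit_ne_nil rest)
        | cons p r => simp [pvSplit, pvConsHead, hs, hc]

theorem pvConsHead_nil (L : List (List Char)) (h : L ≠ []) : pvConsHead [] L = L := by
  cases L with
  | nil => exact absurd rfl h
  | cons p r => simp [pvConsHead]

theorem pvSplit_eq (s : String) :
    (PySem.Str.split? s ".").getD [] = (pvSplit s.toList).map String.ofList := by
  have hsep : (String.toList ".") = ['.'] := by decide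
  have hmap := PySem.Str.split?_map s "."
  rw [hsep] at hmap
  have hchars : PySem.Chars.split? s.toList ['.'] = some (PySem.Chars.splitOn s.toList ['.']) := by
    simp [PySem.Chars.split?]
  rw [hchars] at hmap
  have hgo : PySem.Chars.splitOn s.toList ['.'] = pvSplit s.toList := by
    unfold PySem.Chars.splitOn
    have := pvSplitGo_eq (s.toList.length + 1) s.toList [] [] (by omega)
    simpa [pvConsHead_nil _ (pvSplit_ne_nil s.toList)] using this
  rw [hgo] at hmap
  cases hr : PySem.Str.split? s "." with
  | none => rw [hr] at hmap; simp at hmap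
  | some xs =>
    rw [hr] at hmap
    simp only [Option.map_some, Option.some.injEq] at hmap
    simp only [Option.getD_some]
    have hx : xs = (xs.map String.toList).map String.ofList := by
      rw [List.map_map]
      symm
      exact (List.map_congr_left (fun x _ => String.ofList_toList)).trans (List.map_id xs)
    rw [hx, hmap]

-- positions of '.' in l
def pvDots : List Char → List Nat
  | [] => []
  | c :: t => (if c = '.' then [0] else []) ++ (pvDots t).map (· + 1)

-- the prefixes of l ending at each '.', in order
def pvPrefAll : List Char → List (List Char)
  | [] => []
  | c :: t => (if c = '.' then [[c]] else []) ++ (pvPrefAll t).map (c :: ·)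

theorem pvDots_length (l : List Char) : (pvDots l).length = pvCnt l := by
  induction l with
  | nil => simp [pvDots, pvCnt]
  | cons c t ih => simp [pvDots, pvCnt, ih]; split_ifs <;> simp

theorem pvDots_take (l : List Char) :
    (pvDots l).map (fun d => l.take (d + 1)) = pvPrefAll l := by
  induction l with
  | nil => simp [pvDots, pvPrefAll]
  | cons c t ih =>
    simp only [pvDots, pvPrefAll, List.map_append, List.map_map]
    congr 1
    · split_ifs <;> simp
    · rw [← ih, List.map_map]
      exact List.map_congr_left (fun d _ => by simp [Function.comp, List.take_succ_cons])

-- cumulative dotted prefixes of the split parts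
def pvCum : List (List Char) → List (List Char)
  | [] => []
  | [_] => []
  | p :: q :: r => (p ++ ['.']) :: (pvCum (q :: r)).map (fun x => p ++ ['.'] ++ x)

theorem pvCum_eq_prefAll (l : List Char) : pvCum (pvSplit l) = pvPrefAll l := by
  induction l with
  | nil => simp [pvSplit, pvCum, pvPrefAll]
  | cons c t ih =>
    by_cases hc : c = '.'
    · subst hc
      cases hs : pvSplit t with
      | nil => exact absurd hs (pvSplit_ne_nil t)
      | cons p r =>
        rw [hs] at ih
        rw [show pvSplit ('.' :: t) = [] :: p :: r from by simp [pvSplit, hs]]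
        rw [show pvCum ([] :: p :: r) = ['.'] :: (pvCum (p :: r)).map (fun x => '.' :: x) from by
          simp [pvCum]]
        rw [ih]
        simp [pvPrefAll]
    · cases hs : pvSplit t with
      | nil => exact absurd hs (pvSplit_ne_nil t)
      | cons p r =>
        rw [hs] at ih
        rw [show pvSplit (c :: t) = (c :: p) :: r from by simp [pvSplit, hs, hc]]
        cases r with
        | nil =>
          rw [show pvCum [c :: p] = [] from by simp [pvCum]]
          rw [show pvPrefAll (c :: t) = (pvPrefAll t).map (c :: ·) from by simp [pvPrefAll, hc]]
          rw [← ih]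
          simp [pvCum]
        | cons q r' =>
          rw [show pvCum ((c :: p) :: q :: r') =
                ((c :: p) ++ ['.']) :: (pvCum (q :: r')).map (fun x => (c :: p) ++ ['.'] ++ x) from by
              simp [pvCum]]
          rw [show pvPrefAll (c :: t) = (pvPrefAll t).map (c :: ·) from by simp [pvPrefAll, hc]]
          rw [← ih]
          simp [pvCum, List.map_map, Function.comp, List.append_assoc]

theorem pvFoldl_shift (xs : List (List Char)) (a : List Char) :
    xs.foldl (· ++ ·) a = a ++ xs.foldl (· ++ ·) [] := by
  rw [PySem.List.foldl_append_eq_flatten, PySem.List.foldl_append_eq_flatten]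
  simp

-- the i-th cumulative join of the parts, as an element of pvCum
theorem pvCum_getElem? (P : List (List Char)) : ∀ (i : Nat), i + 1 < P.length →
    (pvCum P)[i]? = some (((P.take (i + 1)).map (· ++ ['.'])).foldl (· ++ ·) []) := by
  induction P with
  | nil => intro i h; simp at h
  | cons p rest ih =>
    intro i h
    cases rest with
    | nil => simp at h
    | cons q r =>
      cases i with
      | zero => simp [pvCum]
      | succ i =>
        have hi : i + 1 < (q :: r).length := by simpa using h
        simp only [pvCum, List.getElem?_cons_succ, List.getElem?_map, ih i hi,
          Option.map_some, Option.some.injEq, List.take_succ_cons, List.map_cons,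
          List.foldl_cons, List.nil_append]
        rw [pvFoldl_shift _ (q ++ ['.']), pvFoldl_shift _ (p ++ ['.'] ++ (q ++ ['.']))]
        simp [List.append_assoc]

-- ===== A-side: the foldl equals the list of cumulative joins =====
def pvPref (L : List String) (m : Nat) : List String :=
  (List.range m).map (fun i => ((L.take (i + 1)).map (fun s => s ++ ".")).foldl (· ++ ·) "")

theorem pvA_eq (L : List String) (m : Nat) (hm : m ≤ L.length) :
    (PySem.List.pyRange 0 (m : Int) 1).foldl
      (fun result cont =>
        if cont > 0 then
          result ++ [((PySem.List.pyGet? result (cont - 1)).getD "") ++ ((PySem.List.pyGet? L cont).getD "") ++ "."]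
        else
          result ++ [((PySem.List.pyGet? L cont).getD "") ++ "."])
      [] = pvPref L m := by
  induction m with
  | zero =>
    have hz : PySem.List.pyRange 0 ((0 : Nat) : Int) 1 = [] := by decide
    rw [hz]
    simp [pvPref]
  | succ m ih =>
    have hm' : m ≤ L.length := Nat.le_of_succ_le hm
    have hmL : m < L.length := hm
    have hcast : (((m + 1 : Nat)) : Int) = (m : Int) + 1 := by push_cast; ring
    rw [hcast, PySem.List.pyRange_one_succ_right (by positivity), List.foldl_append, ih hm']
    have e3 : PySem.List.pyGet? L (m : Int) = some L[m] := by
      rw [PySem.List.pyGet?_natCast, List.getElem?_eq_getElem hmL]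
    have e5 : L.take (m + 1) = L.take m ++ [L[m]] := by
      rw [List.take_add_one, List.getElem?_eq_getElem hmL]
      simp
    have e4 : pvPref L (m + 1) = pvPref L m ++
        [((L.take (m + 1)).map (fun s => s ++ ".")).foldl (· ++ ·) ""] := by
      simp [pvPref, List.range_succ]
    by_cases h0 : m = 0
    · subst h0
      rw [List.foldl_cons]
      norm_num
      have e3' : PySem.List.pyGet? L 0 = some L[0] := by simpa using e3
      have e5' : L.take 1 = [L[0]] := by simpa using e5
      rw [e3']
      simp [pvPref, -List.map_take, e5', String.empty_append]
    · have hm1 : 0 < m := Nat.pos_of_ne_zero h0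
      rw [List.foldl_cons]
      rw [if_pos (by exact_mod_cast hm1)]
      have hlen : (pvPref L m).length = m := by simp [pvPref]
      have ec : ((m : Int) - 1) = ((m - 1 : Nat) : Int) := by omega
      have e2 : PySem.List.pyGet? (pvPref L m) ((m : Int) - 1) =
          some (((L.take (m - 1 + 1)).map (fun s => s ++ ".")).foldl (· ++ ·) "") := by
        rw [ec, PySem.List.pyGet?_natCast, List.getElem?_eq_getElem (by rw [hlen]; omega)]
        simp [pvPref, List.getElem_map, List.getElem_range]
      rw [e2, e3, e4]
      simp only [Option.getD_some, List.foldl_nil]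
      congr 1
      rw [show m - 1 + 1 = m from by omega, e5, List.map_append, List.foldl_append]
      simp [String.append_assoc]

-- lift the string-level cumulative join to the char level
theorem pvFold_ofList (xs : List (List Char)) : ∀ (a : List Char),
    (xs.map String.ofList).foldl (· ++ ·) (String.ofList a) = String.ofList (xs.foldl (· ++ ·) a) := by
  induction xs with
  | nil => intro a; simp
  | cons h t ih =>
    intro a
    simp only [List.map_cons, List.foldl_cons]
    rw [← String.ofList_append, ih]

theorem pvPref_lift (P : List (List Char)) (m : Nat) :
    pvPref (P.map String.ofList) m =
      (List.range m).map (fun i => String.ofList (((P.take (i + 1)).map (· ++ ['.'])).foldl (· ++ ·) [])) := by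
  unfold pvPref
  refine List.map_congr_left (fun i _ => ?_)
  rw [← List.map_take, List.map_map]
  have h1 : ((fun s => s ++ ".") ∘ String.ofList) = String.ofList ∘ (· ++ ['.']) := by
    funext x
    show String.ofList x ++ "." = String.ofList (x ++ ['.'])
    rw [String.ofList_append]
  rw [h1, ← List.map_map, show ("" : String) = String.ofList [] from by decide, pvFold_ofList]

-- ===== main assembly =====
theorem pvDotsFilterMap (l : List Char) : ∀ (s : Int),
    (PySem.List.enumerate l s).filterMap (fun p => if p.2 = '.' then some p.1 else none) =
      (pvDots l).map (fun d : Nat => s + (d : Int)) := by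
  induction l with
  | nil => intro s; simp [pvDots]
  | cons c t ih =>
    intro s
    rw [PySem.List.enumerate_cons, List.filterMap_cons]
    by_cases hc : c = '.'
    · rw [if_pos (by simpa using hc)]
      rw [ih (s + 1)]
      rw [show pvDots (c :: t) = 0 :: (pvDots t).map (· + 1) from by simp [pvDots, hc]]
      rw [List.map_cons, List.map_map]
      rw [show s + ((0 : Nat) : Int) = s from by simp]
      refine congrArg (List.cons s) ?_
      refine List.map_congr_left ?_
      intro d _
      simp only [Function.comp_apply]
      push_cast
      ring
    · rw [if_neg (by simpa using hc)]
      rw [ih (s + 1)]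
      rw [show pvDots (c :: t) = (pvDots t).map (· + 1) from by simp [pvDots, hc]]
      rw [List.map_map]
      refine List.map_congr_left ?_
      intro d _
      simp only [Function.comp_apply]
      push_cast
      ring

-- (pvCum P).take k as an explicit list of cumulative joins
theorem pvCum_take (P : List (List Char)) (k : Nat) (hk : k < P.length) :
    (pvCum P).take k =
      (List.range k).map (fun i => ((P.take (i + 1)).map (· ++ ['.'])).foldl (· ++ ·) []) := by
  apply List.ext_getElem?
  intro i
  by_cases hi : i < k
  · rw [List.getElem?_take_of_lt hi, pvCum_getElem? P i (by omega), List.getElem?_map,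
      List.getElem?_range hi]
    rfl
  · rw [List.getElem?_eq_none (by simp; omega), List.getElem?_eq_none (by simp; omega)]

-- ===== VERDICT (by name: the statement is the Claim_ definition above) =====
theorem listacodigossup_spec : Claim_equal_listacodigossup := by
  unfold Claim_equal_listacodigossup
  intro s _
  unfold Spec_listacodigossup
  simp only [listacodigossup, listacodigossup_alt]
  have hdots : (PySem.List.enumerate s.toList 0).filterMap
      (fun p => if p.2 = '.' then some p.1 else none) =
      (pvDots s.toList).map (fun d : Nat => (d : Int)) := by
    rw [pvDotsFilterMap s.toList 0]
    exact List.map_congr_left fun d _ => by simp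
  rw [hdots]
  have hlenD : ((pvDots s.toList).map (fun d : Nat => (d : Int))).length = pvCnt s.toList := by
    simp [pvDots_length]
  have hcnt : PySem.Str.count s "." = pvCnt s.toList := pvCount_eq s
  by_cases h : PySem.Str.count s "." ≤ 1
  · rw [if_neg (by omega), if_pos (by rw [hlenD]; omega)]
  · rw [if_pos (by omega), if_neg (by rw [hlenD]; omega)]
    rw [hcnt] at h ⊢
    rw [hlenD]
    -- A side: the foldl is the list of cumulative joins of the split parts
    rw [pvSplit_eq s]
    have hPlen : (pvSplit s.toList).length = pvCnt s.toList + 1 := pvSplit_length s.toList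
    rw [show ((pvCnt s.toList : Int) - 1) = ((pvCnt s.toList - 1 : Nat) : Int) from by omega]
    rw [pvA_eq ((pvSplit s.toList).map String.ofList) (pvCnt s.toList - 1)
      (by rw [List.length_map, hPlen]; omega)]
    rw [pvPref_lift]
    -- B side: the slices at the (truncated) dot positions are the same cumulative joins
    rw [PySem.List.slice_to_natCast]
    have hB : (((pvDots s.toList).map (fun d : Nat => (d : Int))).take (pvCnt s.toList - 1)).map
        (fun d : Int => PySem.Str.slice s none (some (d + 1))) =
        (((pvDots s.toList).map (fun d => s.toList.take (d + 1))).take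
          (pvCnt s.toList - 1)).map String.ofList := by
      rw [← List.map_take, ← List.map_take, List.map_map, List.map_map]
      refine List.map_congr_left ?_
      intro d _
      simp only [Function.comp_apply]
      apply String.toList_inj.mp
      rw [PySem.Str.toList_slice]
      rw [show ((d : Int) + 1) = ((d + 1 : Nat) : Int) from by push_cast; ring]
      rw [PySem.Chars.slice_eq_listSlice, PySem.List.slice_to_natCast, String.toList_ofList]
    rw [hB, pvDots_take, ← pvCum_eq_prefAll,
      pvCum_take _ _ (by rw [hPlen]; omega)]
    simp [List.map_map, Function.comp]
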